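-- pv_equiv track=rewrite | github.com/EricPaesBarreto/prg-basics | PrepForTest3/Mock1/p1.py | f
-- ===== SOURCE A (Python) =====
-- def f(word):
--     wave = []
--     for index in range(len(word)):
--         new_word = ""
--         for index_2 in range(len(word)):
--             if index == index_2:
--                 new_word += word[index_2].upper()
--             else:
--                 new_word += word[index_2]
--         wave.append(new_word)
--     return "-".join(wave)
-- ===== SOURCE B (Python) =====
-- def f(word):
--     return "-".join([word[:i] + word[i].upper() + word[i+1:] for i in range(len(word))])
-- ===== Notes on version B (the rewrite author's own statement) =====
-- stated objective: simpler
-- what changed: Replaces the inner per-character loop with conditional uppercasing by a one-line slice construction word[:i] + word[i].upper() + word[i+1:] collected in a list comprehension.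
import Mathlib
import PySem

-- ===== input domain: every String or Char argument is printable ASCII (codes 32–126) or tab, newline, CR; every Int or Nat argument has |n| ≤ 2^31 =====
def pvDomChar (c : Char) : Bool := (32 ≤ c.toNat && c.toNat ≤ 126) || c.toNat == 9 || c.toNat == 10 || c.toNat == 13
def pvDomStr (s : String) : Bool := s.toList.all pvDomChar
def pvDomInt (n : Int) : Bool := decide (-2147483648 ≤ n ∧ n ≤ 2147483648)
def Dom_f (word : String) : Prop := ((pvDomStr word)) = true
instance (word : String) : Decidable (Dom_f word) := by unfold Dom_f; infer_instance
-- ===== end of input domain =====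

-- B replaces A's inner per-character loop (conditional uppercasing) by direct slice
-- construction word[:i] + word[i].upper() + word[i+1:] in a list comprehension (simpler; a timing run measured it faster by a constant factor: C-level slicing vs per-char concatenation).


-- ===== PORT A =====
-- outer loop: wave.append(new_word); inner loop builds new_word char by char
def f (word : String) : String :=
  String.ofList (PySem.Chars.join ['-']
    ((PySem.List.pyRange 0 (PySem.Str.len word) 1).foldl (fun wave index =>
      wave ++ [(PySem.List.pyRange 0 (PySem.Str.len word) 1).foldl (fun newWord index2 =>
          newWord ++ (if index == index2
                      then PySem.Chars.upper [PySem.List.pyGetD word.toList index2 ' ']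
                      else [PySem.List.pyGetD word.toList index2 ' '])) ([] : List Char)])
      ([] : List (List Char))))

-- ===== PORT B =====
-- comprehension: word[:i] + word[i].upper() + word[i+1:] for i in range(len(word))
def f_alt (word : String) : String :=
  String.ofList (PySem.Chars.join ['-']
    ((PySem.List.pyRange 0 (PySem.Str.len word) 1).map (fun i =>
      PySem.List.slice word.toList none (some i)
        ++ PySem.Chars.upper [PySem.List.pyGetD word.toList i ' ']
        ++ PySem.List.slice word.toList (some (i + 1)) none)))

-- ===== PRECONDITION & SPEC =====
def Spec_f (word : String) (out : String) : Prop := out = f_alt word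
instance (word : String) (out : String) : Decidable (Spec_f word out) := by unfold Spec_f; infer_instance

-- ===== CLAIM (what is proved, stated in full; the proofs are below) =====
def Claim_equal_f : Prop := ∀ (word : String), Dom_f word → Spec_f word (f word)

-- ===== LEMMAS AND PROOFS =====

lemma map_getD_range_eq_take (cs : List Char) (k : Nat) (hk : k ≤ cs.length) :
    (List.range k).map (fun j => cs.getD j ' ') = cs.take k := by
  apply List.ext_getElem
  · simp [hk]
  · intro i h1 h2
    simp only [List.getElem_map, List.getElem_range, List.getElem_take]
    have : i < cs.length := by simp at h2; omega
    simp [this]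

lemma map_getD_range_eq_drop (cs : List Char) (a m : Nat) (hm : a + m = cs.length) :
    (List.range m).map (fun t => cs.getD (a + t) ' ') = cs.drop a := by
  apply List.ext_getElem
  · simp; omega
  · intro i h1 h2
    simp only [List.getElem_map, List.getElem_range, List.getElem_drop]
    have : a + i < cs.length := by simp at h2; omega
    simp [this]

lemma wave_flatMap (cs : List Char) (k : Nat) (hk : k < cs.length) (u : List Char) :
    (List.range cs.length).flatMap
        (fun j => if k = j then u else [cs.getD j ' ']) =
      cs.take k ++ u ++ cs.drop (k + 1) := by
  obtain ⟨m, hm⟩ : ∃ m, cs.length = k + 1 + m := ⟨cs.length - (k + 1), by omega⟩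
  have hr : List.range cs.length
      = (List.range k ++ [k]) ++ (List.range m).map (fun t => k + 1 + t) := by
    rw [hm, List.range_add, List.range_succ]
  rw [hr, List.flatMap_append, List.flatMap_append, List.flatMap_map]
  have h1 : (List.range k).flatMap (fun j => if k = j then u else [cs.getD j ' '])
      = cs.take k := by
    rw [List.flatMap_congr (g := fun j => [cs.getD j ' '])
        (fun j hj => if_neg (by have := List.mem_range.mp hj; omega)),
      ← List.map_eq_flatMap]
    exact map_getD_range_eq_take cs k (by omega)
  have h2 : [k].flatMap (fun j => if k = j then u else [cs.getD j ' ']) = u := by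
    simp
  have h3 : (List.range m).flatMap
      (fun t => if k = k + 1 + t then u else [cs.getD (k + 1 + t) ' '])
      = cs.drop (k + 1) := by
    rw [List.flatMap_congr (g := fun t => [cs.getD (k + 1 + t) ' '])
        (fun t _ => by rw [if_neg (by omega)]),
      ← List.map_eq_flatMap]
    exact map_getD_range_eq_drop cs (k + 1) m (by omega)
  rw [h1, h2, h3]

theorem f_eq_alt (word : String) : f word = f_alt word := by
  unfold f f_alt
  congr 1
  rw [PySem.List.foldl_append_singleton_eq_map, List.nil_append]
  have hlen : PySem.Str.len word = (word.toList.length : Int) := by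
    simp [PySem.Str.len_eq]
  rw [hlen]
  congr 1
  apply List.map_congr_left
  intro i hi
  rw [PySem.List.pyRange_zero_natCast] at hi
  obtain ⟨k, hk, rfl⟩ := List.mem_map.mp hi
  have hklt : k < word.toList.length := List.mem_range.mp hk
  rw [PySem.List.foldl_append_eq_flatMap, List.nil_append,
      PySem.List.pyRange_zero_natCast, List.flatMap_map]
  rw [List.flatMap_congr
      (g := fun j : Nat => if k = j
          then PySem.Chars.upper [PySem.List.pyGetD word.toList (k : Int) ' ']
          else [word.toList.getD j ' '])
      (fun j _ => by
        simp only [PySem.List.pyGetD_natCast, beq_iff_eq, Nat.cast_inj]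
        by_cases h : k = j
        · subst h; simp
        · simp [h]),
    wave_flatMap word.toList k hklt _]
  rw [PySem.List.slice_to_natCast]
  rw [show ((k : Int) + 1) = ((k + 1 : Nat) : Int) by push_cast; ring,
      PySem.List.slice_from_natCast]

-- ===== VERDICT (by name: the statement is the Claim_ definition above) =====
theorem f_spec : Claim_equal_f := by
  intro word _
  unfold Spec_f
  exact f_eq_alt word
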